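-- pv_equiv track=rewrite | github.com/hhux/DOMASHKA | domashka N6.py | f
-- ===== SOURCE A (Python) =====
-- def f(a):
--     z = a.replace('-', '').replace('+', '').replace(' ', '')
--     for i in z:
--         if i.isdigit():
--             continue
--         else:
--             return 'Некорректный номер телефона'
--     return "Номер телефона состоит из цифр"
-- ===== SOURCE B (Python) =====
-- def f(a):
--     if set(a) <= set('0123456789-+ '):
--         return "Номер телефона состоит из цифр"
--     return 'Некорректный номер телефона'
-- ===== Notes on version B (the rewrite author's own statement) =====
-- stated objective: alternative
-- what changed: B replaces A's three .replace cleaning passes plus a per-character validation loop by a set-theoretic check: it builds the set of distinct characters of the input once and tests it for subset inclusion in the 13-character allowed alphabet set (digits plus hyphen, plus sign and space).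
import Mathlib
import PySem

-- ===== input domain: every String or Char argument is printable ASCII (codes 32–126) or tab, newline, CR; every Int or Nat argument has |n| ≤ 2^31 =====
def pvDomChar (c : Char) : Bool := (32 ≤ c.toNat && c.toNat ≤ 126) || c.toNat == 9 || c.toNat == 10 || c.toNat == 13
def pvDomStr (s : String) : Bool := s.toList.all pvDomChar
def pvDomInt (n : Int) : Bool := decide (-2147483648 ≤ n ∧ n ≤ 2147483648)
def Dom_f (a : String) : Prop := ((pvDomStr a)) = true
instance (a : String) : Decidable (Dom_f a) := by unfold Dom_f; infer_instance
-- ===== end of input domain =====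

-- B replaces A's three .replace cleaning passes plus a per-character validation loop by a
-- set-theoretic check: the set of distinct input characters is tested for subset inclusion
-- in the allowed alphabet set '0123456789-+ '; objective: alternative.

-- ===== PORT A =====
-- the for-loop over the cleaned string z
def fLoop : List Char → String
  | [] => "Номер телефона состоит из цифр"
  | c :: t => if PySem.Chars.isdigit c then fLoop t else "Некорректный номер телефона"

def f (a : String) : String :=
  let z := PySem.Str.replace (PySem.Str.replace (PySem.Str.replace a "-" "") "+" "") " " ""
  fLoop z.toList

-- ===== PORT B =====
def f_alt (a : String) : String :=
  if PySem.Set.issubset (PySem.Set.ofList a.toList) (PySem.Set.ofList "0123456789-+ ".toList)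
  then "Номер телефона состоит из цифр"
  else "Некорректный номер телефона"

-- ===== PRECONDITION & SPEC =====
def Spec_f (a : String) (out : String) : Prop := out = f_alt a
instance (a : String) (out : String) : Decidable (Spec_f a out) := by unfold Spec_f; infer_instance

-- ===== CLAIM (what is proved, stated in full; the proofs are below) =====
def Claim_equal_f : Prop := ∀ (a : String), Dom_f a → Spec_f a (f a)

-- ===== LEMMAS AND PROOFS =====

-- replace with a single-char pattern and empty replacement is filter
theorem replace_go_filter (c : Char) :
    ∀ (l : List Char) (fuel : Nat) (acc : List Char), l.length ≤ fuel →
      PySem.Chars.replace.go [c] [] fuel l acc = acc.reverse ++ l.filter (fun x => !(x == c)) := by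
  intro l
  induction l with
  | nil =>
      intro fuel acc _
      cases fuel <;> simp [PySem.Chars.replace.go]
  | cons c' t ih =>
      intro fuel acc h
      cases fuel with
      | zero => simp at h
      | succ n =>
        simp only [PySem.Chars.replace.go]
        by_cases hc : c' = c
        · subst hc
          simp only [List.isPrefixOf]
          simp [ih n acc (by simpa using h)]
        · have hp : List.isPrefixOf [c] (c' :: t) = false := by
            simp [List.isPrefixOf]; exact fun h' => (hc h'.symm).elim
          simp only [hp, Bool.false_eq_true, ite_false]
          rw [ih n (c' :: acc) (by simpa using h)]
          simp [hc]

theorem replace_single (c : Char) (l : List Char) :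
    PySem.Chars.replace l [c] [] = l.filter (fun x => !(x == c)) := by
  rw [PySem.Chars.replace]
  simp only [List.isEmpty, Bool.false_eq_true, ite_false]
  simpa using replace_go_filter c l l.length [] (le_refl _)

theorem fLoop_all (l : List Char) :
    fLoop l = if l.all PySem.Chars.isdigit
              then "Номер телефона состоит из цифр"
              else "Некорректный номер телефона" := by
  induction l with
  | nil => simp [fLoop]
  | cons c t ih =>
      simp only [fLoop, List.all_cons, ih, Bool.and_eq_true]
      by_cases h : PySem.Chars.isdigit c = true <;> simp [h]

-- filtering out the three separators then checking digits = one combined per-character check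
theorem key (l : List Char) :
    ((((l.filter (fun x => !(x == '-'))).filter (fun x => !(x == '+'))).filter
        (fun x => !(x == ' '))).all PySem.Chars.isdigit)
      = l.all (fun c => PySem.Chars.isdigit c || ['-', '+', ' '].contains c) := by
  induction l with
  | nil => rfl
  | cons c t ih =>
      by_cases h1 : c = '-'
      · subst h1; simpa [List.filter_cons] using ih
      · by_cases h2 : c = '+'
        · subst h2; simpa [List.filter_cons] using ih
        · by_cases h3 : c = ' '
          · subst h3; simpa [List.filter_cons] using ih
          · have b1 : (c == '-') = false := by simp [h1]
            have b2 : (c == '+') = false := by simp [h2]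
            have b3 : (c == ' ') = false := by simp [h3]
            simp only [List.filter_cons, b1, b2, b3, Bool.not_false, if_true, List.all_cons, ih,
              List.contains_cons, List.contains_nil, Bool.or_false]

-- per-character: "digit or separator" is exactly membership in the allowed alphabet
theorem char_alphabet (c : Char) :
    (PySem.Chars.isdigit c || ['-', '+', ' '].contains c)
      = decide (c ∈ ("0123456789-+ ".toList)) := by
  have h : ∀ d : Char, (c = d) ↔ c.val.toNat = d.val.toNat := by
    intro d; constructor
    · rintro rfl; rfl
    · intro h; exact Char.ext (UInt32.toNat_inj.mp h)
  simp only [PySem.Chars.isdigit, List.contains_cons, List.contains_nil,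
    show ("0123456789-+ ".toList) = ['0','1','2','3','4','5','6','7','8','9','-','+',' '] from rfl,
    List.mem_cons, List.not_mem_nil, or_false, Char.le_def, UInt32.le_iff_toNat_le]
  simp only [h,
    show ('0' : Char).val.toNat = 48 from rfl, show ('1' : Char).val.toNat = 49 from rfl,
    show ('2' : Char).val.toNat = 50 from rfl, show ('3' : Char).val.toNat = 51 from rfl,
    show ('4' : Char).val.toNat = 52 from rfl, show ('5' : Char).val.toNat = 53 from rfl,
    show ('6' : Char).val.toNat = 54 from rfl, show ('7' : Char).val.toNat = 55 from rfl,
    show ('8' : Char).val.toNat = 56 from rfl, show ('9' : Char).val.toNat = 57 from rfl]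
  rw [Bool.eq_iff_iff]
  simp only [Bool.or_eq_true, Bool.and_eq_true, decide_eq_true_iff, beq_iff_eq, h,
    Bool.false_eq_true, or_false,
    show ('-' : Char).val.toNat = 45 from rfl, show ('+' : Char).val.toNat = 43 from rfl,
    show (' ' : Char).val.toNat = 32 from rfl]
  omega

-- B's subset test on the distinct-character set = A's all-characters check
theorem subset_eq_all (a : String) :
    PySem.Set.issubset (PySem.Set.ofList a.toList) (PySem.Set.ofList "0123456789-+ ".toList)
      = a.toList.all (fun c => PySem.Chars.isdigit c || ['-', '+', ' '].contains c) := by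
  rw [Bool.eq_iff_iff, PySem.Set.issubset_iff, List.all_eq_true]
  constructor
  · intro hs c hc
    have := hs c (by simpa [PySem.Set.mem_ofList] using hc)
    rw [char_alphabet]
    simpa [PySem.Set.mem_ofList] using this
  · intro hs c hc
    have := hs c (by simpa [PySem.Set.mem_ofList] using hc)
    rw [char_alphabet] at this
    simpa [PySem.Set.mem_ofList] using this

-- ===== VERDICT (by name: the statement is the Claim_ definition above) =====
theorem f_spec : Claim_equal_f := by
  intro a _
  unfold Spec_f f_alt
  have hf : f a = fLoop (PySem.Str.replace (PySem.Str.replace (PySem.Str.replace a "-" "") "+" "") " " "").toList := rfl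
  have hl : (PySem.Str.replace (PySem.Str.replace (PySem.Str.replace a "-" "") "+" "") " " "").toList
      = ((a.toList.filter (fun x => !(x == '-'))).filter (fun x => !(x == '+'))).filter
            (fun x => !(x == ' ')) := by
    simp only [PySem.Str.toList_replace]
    rw [show ("-" : String).toList = ['-'] from rfl, show ("+" : String).toList = ['+'] from rfl,
        show (" " : String).toList = [' '] from rfl, show ("" : String).toList = [] from rfl,
        replace_single, replace_single, replace_single]
  rw [hf, hl, fLoop_all, key, subset_eq_all]
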